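-- pv_equiv track=rewrite | github.com/JoyOfHardware/RV_Formal | py/gen_json/gen_forms_and_field_mappings_json.py | process_ranges_with_mapping
-- ===== SOURCE A (Python) =====
-- def process_ranges_with_mapping(input_dict):
--     label_counters = {}
--     output_dict = {}
--     mapping_dict = {}
--
--     for key, sub_dict in input_dict.items():
--         output_dict[key] = []
--         for label, range_tuple in sub_dict.items():
--             if label not in label_counters:
--                 label_counters[label] = {}
--             if range_tuple not in label_counters[label]:
--                 label_counters[label][range_tuple] = len(label_counters[label]) + 1
--             numbered_label = f"{label}_{label_counters[label][range_tuple]}"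
--             output_dict[key].append(numbered_label)
--             mapping_dict[numbered_label] = range_tuple
--
--     return output_dict, mapping_dict
-- ===== SOURCE B (Python) =====
-- def process_ranges_with_mapping(input_dict):
--     # Pass 1: assign sequential ids per label to distinct range tuples (global,
--     # first-appearance order) and build the numbered-label -> range mapping.
--     label_counters = {}
--     mapping_dict = {}
--     for sub_dict in input_dict.values():
--         for label, range_tuple in sub_dict.items():
--             if label not in label_counters:
--                 label_counters[label] = {}
--             if range_tuple not in label_counters[label]:
--                 label_counters[label][range_tuple] = len(label_counters[label]) + 1
--             mapping_dict[f"{label}_{label_counters[label][range_tuple]}"] = range_tuple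
--     # Pass 2: derive each key's list from the finished index.
--     output_dict = {
--         key: [f"{label}_{label_counters[label][rt]}" for label, rt in sub_dict.items()]
--         for key, sub_dict in input_dict.items()
--     }
--     return output_dict, mapping_dict
-- ===== Notes on version B (the rewrite author's own statement) =====
-- stated objective: alternative
-- what changed: Split A's single interleaved loop into two passes: a first pass that builds only the label counters and the numbered-label-to-range mapping, and a second pass (a dict/list comprehension) that derives each key's output list from the finished counter index instead of building it inline.
import Mathlib
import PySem

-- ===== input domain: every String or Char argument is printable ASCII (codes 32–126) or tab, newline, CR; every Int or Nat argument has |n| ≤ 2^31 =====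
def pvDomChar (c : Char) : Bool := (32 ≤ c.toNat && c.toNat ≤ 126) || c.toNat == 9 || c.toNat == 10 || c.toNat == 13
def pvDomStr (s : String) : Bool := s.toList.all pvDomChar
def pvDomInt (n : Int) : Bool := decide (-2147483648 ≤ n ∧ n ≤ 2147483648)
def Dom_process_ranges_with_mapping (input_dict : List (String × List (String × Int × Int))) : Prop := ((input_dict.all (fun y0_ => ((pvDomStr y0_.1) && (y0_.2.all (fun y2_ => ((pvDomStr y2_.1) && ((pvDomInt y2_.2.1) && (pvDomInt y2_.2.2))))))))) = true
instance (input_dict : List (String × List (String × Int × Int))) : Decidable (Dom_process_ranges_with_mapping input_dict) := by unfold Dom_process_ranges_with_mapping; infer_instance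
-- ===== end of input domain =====

-- B re-decomposes A's single interleaved loop into two passes (counter/mapping pass, then a
-- comprehension deriving each key's list from the finished index); equal return value, 'alternative'.

-- Shared helpers: both Pythons contain the identical counter-update lines
-- 'if label not in …: …; if range_tuple not in …: … = len(…)+1' and the f-string
-- f"{label}_{label_counters[label][range_tuple]}"; these transliterate them once.
abbrev pvCtrs := PySem.Dict String (PySem.Dict (Int × Int) Int)

def pvBump (c : pvCtrs) (label : String) (rt : Int × Int) : pvCtrs :=
  let c1 := if c.contains label then c else c.insert label PySem.Dict.empty
  if (c1.getD label PySem.Dict.empty).contains rt then c1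
  else c1.insert label
    ((c1.getD label PySem.Dict.empty).insert rt (((c1.getD label PySem.Dict.empty).size : Int) + 1))

def pvId (c : pvCtrs) (label : String) (rt : Int × Int) : Int :=
  (c.getD label PySem.Dict.empty).getD rt 0

def pvLbl (c : pvCtrs) (label : String) (rt : Int × Int) : String :=
  label ++ "_" ++ PySem.Int.toStr (pvId c label rt)

-- ===== PORT A =====
-- one loop: counters, output lists and the mapping grow together, entry by entry
def process_ranges_with_mapping (input_dict : List (String × List (String × Int × Int))) : (List (String × List String)) × (List (String × Int × Int)) :=
  let st := input_dict.foldl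
    (fun (st : pvCtrs × PySem.Dict String (List String) × PySem.Dict String (Int × Int)) kv =>
      kv.2.foldl
        (fun (st : pvCtrs × PySem.Dict String (List String) × PySem.Dict String (Int × Int)) e =>
          (pvBump st.1 e.1 e.2,
           st.2.1.modify kv.1 [] (fun s => s ++ [pvLbl (pvBump st.1 e.1 e.2) e.1 e.2]),
           st.2.2.insert (pvLbl (pvBump st.1 e.1 e.2) e.1 e.2) e.2))
        (st.1, st.2.1.insert kv.1 [], st.2.2))
    (PySem.Dict.empty, PySem.Dict.empty, PySem.Dict.empty)
  (st.2.1.items, st.2.2.items)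

-- ===== PORT B =====
-- pass 1: counters + mapping only; pass 2: each key's list from the finished counters
def process_ranges_with_mapping_alt (input_dict : List (String × List (String × Int × Int))) : (List (String × List String)) × (List (String × Int × Int)) :=
  let p := input_dict.foldl
    (fun (p : pvCtrs × PySem.Dict String (Int × Int)) kv =>
      kv.2.foldl
        (fun (p : pvCtrs × PySem.Dict String (Int × Int)) e =>
          (pvBump p.1 e.1 e.2, p.2.insert (pvLbl (pvBump p.1 e.1 e.2) e.1 e.2) e.2))
        p)
    (PySem.Dict.empty, PySem.Dict.empty)
  let output := input_dict.foldl
    (fun (od : PySem.Dict String (List String)) kv =>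
      od.insert kv.1 (kv.2.map (fun e => pvLbl p.1 e.1 e.2)))
    PySem.Dict.empty
  (output.items, p.2.items)

-- ===== PRECONDITION & SPEC =====
def Spec_process_ranges_with_mapping (input_dict : List (String × List (String × Int × Int))) (out : (List (String × List String)) × (List (String × Int × Int))) : Prop := out = process_ranges_with_mapping_alt input_dict
instance (input_dict : List (String × List (String × Int × Int))) (out : (List (String × List String)) × (List (String × Int × Int))) : Decidable (Spec_process_ranges_with_mapping input_dict out) := by unfold Spec_process_ranges_with_mapping; infer_instance

-- ===== CLAIM (what is proved, stated in full; the proofs are below) =====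
def Claim_equal_process_ranges_with_mapping : Prop := ∀ (input_dict : List (String × List (String × Int × Int))), Dom_process_ranges_with_mapping input_dict → Spec_process_ranges_with_mapping input_dict (process_ranges_with_mapping input_dict)

-- ===== LEMMAS AND PROOFS =====

-- counters after the inner loop over one sub-dict, resp. after the whole outer loop
def pvInnerC (c : pvCtrs) (sub : List (String × Int × Int)) : pvCtrs :=
  sub.foldl (fun c e => pvBump c e.1 e.2) c

def pvBigC (c : pvCtrs) (L : List (String × List (String × Int × Int))) : pvCtrs :=
  L.foldl (fun c kv => pvInnerC c kv.2) c

-- the labels A appends for one sub-dict, computed with the evolving counters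
def pvLabels (c : pvCtrs) (sub : List (String × Int × Int)) : List String :=
  match sub with
  | [] => []
  | e :: t => pvLbl (pvBump c e.1 e.2) e.1 e.2 :: pvLabels (pvBump c e.1 e.2) t

-- "C extends c": every id already assigned in c is still assigned, unchanged, in C
def pvMono (c C : pvCtrs) : Prop :=
  ∀ l rt, ((c.getD l PySem.Dict.empty).contains rt = true) →
    ((C.getD l PySem.Dict.empty).contains rt = true) ∧ pvId C l rt = pvId c l rt

theorem pvMono_refl (c : pvCtrs) : pvMono c c := fun _ _ h => ⟨h, rfl⟩

theorem pvMono_trans {a b c : pvCtrs} (h1 : pvMono a b) (h2 : pvMono b c) : pvMono a c := by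
  intro l rt h
  obtain ⟨hb, eb⟩ := h1 l rt h
  obtain ⟨hc, ec⟩ := h2 l rt hb
  exact ⟨hc, ec.trans eb⟩

theorem pvMono_bump (c : pvCtrs) (label : String) (rt : Int × Int) :
    pvMono c (pvBump c label rt) := by
  have step2 : ∀ c1 : pvCtrs, pvMono c1
      (if (c1.getD label PySem.Dict.empty).contains rt then c1
       else c1.insert label
         ((c1.getD label PySem.Dict.empty).insert rt
           (((c1.getD label PySem.Dict.empty).size : Int) + 1))) := by
    intro c1 l' rt' h
    by_cases hc : (c1.getD label PySem.Dict.empty).contains rt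
    · rw [if_pos hc]; exact ⟨h, rfl⟩
    · rw [if_neg hc]
      by_cases hl : l' = label
      · subst hl
        have hne : rt' ≠ rt := by
          intro e; subst e; exact hc h
        refine ⟨?_, ?_⟩
        · rw [PySem.Dict.getD_insert_self, PySem.Dict.contains_insert]
          simp [h]
        · unfold pvId
          rw [PySem.Dict.getD_insert_self, PySem.Dict.getD_insert]
          simp [hne]
      · refine ⟨?_, ?_⟩
        · rw [PySem.Dict.getD_insert_of_ne _ _ _ hl]; exact h
        · unfold pvId; rw [PySem.Dict.getD_insert_of_ne _ _ _ hl]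
  have step1 : pvMono c (if c.contains label then c else c.insert label PySem.Dict.empty) := by
    by_cases hcl : c.contains label
    · rw [if_pos hcl]; exact pvMono_refl c
    · rw [if_neg hcl]
      intro l' rt' h
      by_cases hl : l' = label
      · subst hl
        have he : c.getD l' PySem.Dict.empty = PySem.Dict.empty :=
          PySem.Dict.getD_of_not_contains _ _ (by simpa using hcl)
        rw [he] at h
        simp [PySem.Dict.contains_empty] at h
      · refine ⟨?_, ?_⟩
        · rw [PySem.Dict.getD_insert_of_ne _ _ _ hl]; exact h
        · unfold pvId; rw [PySem.Dict.getD_insert_of_ne _ _ _ hl]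
  simp only [pvBump]
  exact pvMono_trans step1 (step2 _)

theorem pvBump_sets (c : pvCtrs) (label : String) (rt : Int × Int) :
    (((pvBump c label rt).getD label PySem.Dict.empty).contains rt = true) := by
  simp only [pvBump]
  by_cases hc : (((if c.contains label then c else c.insert label PySem.Dict.empty).getD label
      PySem.Dict.empty).contains rt)
  · rw [if_pos hc]; exact hc
  · rw [if_neg hc, PySem.Dict.getD_insert_self, PySem.Dict.contains_insert]
    simp

theorem pvMono_innerC (c : pvCtrs) (sub : List (String × Int × Int)) :
    pvMono c (pvInnerC c sub) := by
  induction sub generalizing c with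
  | nil => exact pvMono_refl c
  | cons e t ih =>
      exact pvMono_trans (pvMono_bump c e.1 e.2) (ih (pvBump c e.1 e.2))

theorem pvMono_bigC (c : pvCtrs) (L : List (String × List (String × Int × Int))) :
    pvMono c (pvBigC c L) := by
  induction L generalizing c with
  | nil => exact pvMono_refl c
  | cons kv T ih =>
      exact pvMono_trans (pvMono_innerC c kv.2) (ih (pvInnerC c kv.2))

theorem pvLabels_eq_map (sub : List (String × Int × Int)) (c C : pvCtrs)
    (h : pvMono (pvInnerC c sub) C) :
    pvLabels c sub = sub.map (fun e => pvLbl C e.1 e.2) := by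
  induction sub generalizing c with
  | nil => rfl
  | cons e t ih =>
      have hInner : pvInnerC c (e :: t) = pvInnerC (pvBump c e.1 e.2) t := rfl
      rw [hInner] at h
      have hmono : pvMono (pvBump c e.1 e.2) C :=
        pvMono_trans (pvMono_innerC (pvBump c e.1 e.2) t) h
      have hset := pvBump_sets c e.1 e.2
      obtain ⟨_, hid⟩ := hmono e.1 e.2 hset
      simp only [pvLabels, List.map, ih (pvBump c e.1 e.2) h, pvLbl, hid]

theorem pvModifyFold (lbls : List String) (od : PySem.Dict String (List String))
    (key : String) (v : List String) :
    lbls.foldl (fun od l => od.modify key [] (fun s => s ++ [l])) (od.insert key v)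
      = od.insert key (v ++ lbls) := by
  induction lbls generalizing v with
  | nil => simp
  | cons l t ih =>
      have h1 : (od.insert key v).modify key [] (fun s => s ++ [l])
          = od.insert key (v ++ [l]) := by
        simp [PySem.Dict.modify, PySem.Dict.insert_insert_self,
          PySem.Dict.getD_eq_get?_getD]
      simp only [List.foldl_cons, h1, ih (v ++ [l]), List.append_assoc, List.singleton_append]

theorem pvInnerA (sub : List (String × Int × Int)) (c : pvCtrs)
    (od : PySem.Dict String (List String)) (m : PySem.Dict String (Int × Int)) (key : String) :
    sub.foldl
      (fun (st : pvCtrs × PySem.Dict String (List String) × PySem.Dict String (Int × Int)) e =>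
        (pvBump st.1 e.1 e.2,
         st.2.1.modify key [] (fun s => s ++ [pvLbl (pvBump st.1 e.1 e.2) e.1 e.2]),
         st.2.2.insert (pvLbl (pvBump st.1 e.1 e.2) e.1 e.2) e.2))
      (c, od, m)
    = (pvInnerC c sub,
       (pvLabels c sub).foldl (fun od l => od.modify key [] (fun s => s ++ [l])) od,
       (sub.foldl
         (fun (p : pvCtrs × PySem.Dict String (Int × Int)) e =>
           (pvBump p.1 e.1 e.2, p.2.insert (pvLbl (pvBump p.1 e.1 e.2) e.1 e.2) e.2))
         (c, m)).2) := by
  induction sub generalizing c od m with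
  | nil => rfl
  | cons e t ih => exact ih (pvBump c e.1 e.2) _ _

theorem pvB1_inner (sub : List (String × Int × Int)) (p : pvCtrs × PySem.Dict String (Int × Int)) :
    (sub.foldl
      (fun (p : pvCtrs × PySem.Dict String (Int × Int)) e =>
        (pvBump p.1 e.1 e.2, p.2.insert (pvLbl (pvBump p.1 e.1 e.2) e.1 e.2) e.2))
      p).1 = pvInnerC p.1 sub := by
  induction sub generalizing p with
  | nil => rfl
  | cons e t ih => exact ih _

theorem pvB1_pair (sub : List (String × Int × Int)) (p : pvCtrs × PySem.Dict String (Int × Int)) :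
    sub.foldl
      (fun (p : pvCtrs × PySem.Dict String (Int × Int)) e =>
        (pvBump p.1 e.1 e.2, p.2.insert (pvLbl (pvBump p.1 e.1 e.2) e.1 e.2) e.2))
      p
    = (pvInnerC p.1 sub,
       (sub.foldl
         (fun (p : pvCtrs × PySem.Dict String (Int × Int)) e =>
           (pvBump p.1 e.1 e.2, p.2.insert (pvLbl (pvBump p.1 e.1 e.2) e.1 e.2) e.2))
         p).2) := by
  rw [← pvB1_inner sub p]

theorem pvB1_counters (L : List (String × List (String × Int × Int))) (c : pvCtrs)
    (m : PySem.Dict String (Int × Int)) :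
    (L.foldl
      (fun (p : pvCtrs × PySem.Dict String (Int × Int)) kv =>
        kv.2.foldl
          (fun (p : pvCtrs × PySem.Dict String (Int × Int)) e =>
            (pvBump p.1 e.1 e.2, p.2.insert (pvLbl (pvBump p.1 e.1 e.2) e.1 e.2) e.2))
          p)
      (c, m)).1 = pvBigC c L := by
  induction L generalizing c m with
  | nil => rfl
  | cons kv T ih =>
      rw [List.foldl_cons, pvBigC, List.foldl_cons]
      rw [pvB1_pair kv.2 (c, m)]
      exact ih _ _

theorem pvMain (L : List (String × List (String × Int × Int))) (c : pvCtrs)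
    (od : PySem.Dict String (List String)) (m : PySem.Dict String (Int × Int)) :
    L.foldl
      (fun (st : pvCtrs × PySem.Dict String (List String) × PySem.Dict String (Int × Int)) kv =>
        kv.2.foldl
          (fun (st : pvCtrs × PySem.Dict String (List String) × PySem.Dict String (Int × Int)) e =>
            (pvBump st.1 e.1 e.2,
             st.2.1.modify kv.1 [] (fun s => s ++ [pvLbl (pvBump st.1 e.1 e.2) e.1 e.2]),
             st.2.2.insert (pvLbl (pvBump st.1 e.1 e.2) e.1 e.2) e.2))
          (st.1, st.2.1.insert kv.1 [], st.2.2))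
      (c, od, m)
    = (pvBigC c L,
       L.foldl
         (fun (od : PySem.Dict String (List String)) kv =>
           od.insert kv.1 (kv.2.map (fun e => pvLbl (pvBigC c L) e.1 e.2)))
         od,
       (L.foldl
         (fun (p : pvCtrs × PySem.Dict String (Int × Int)) kv =>
           kv.2.foldl
             (fun (p : pvCtrs × PySem.Dict String (Int × Int)) e =>
               (pvBump p.1 e.1 e.2, p.2.insert (pvLbl (pvBump p.1 e.1 e.2) e.1 e.2) e.2))
             p)
         (c, m)).2) := by
  induction L generalizing c od m with
  | nil => rfl
  | cons kv T ih =>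
      simp only [List.foldl_cons]
      rw [pvInnerA, pvModifyFold, List.nil_append, ih, pvB1_pair kv.2 (c, m)]
      have hC : pvBigC c (kv :: T) = pvBigC (pvInnerC c kv.2) T := rfl
      rw [hC, pvLabels_eq_map kv.2 c (pvBigC (pvInnerC c kv.2) T)
        (pvMono_bigC (pvInnerC c kv.2) T)]

-- ===== VERDICT (by name: the statement is the Claim_ definition above) =====
theorem process_ranges_with_mapping_spec : Claim_equal_process_ranges_with_mapping := by
  intro input_dict _
  unfold Spec_process_ranges_with_mapping process_ranges_with_mapping process_ranges_with_mapping_alt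
  simp only [pvMain, pvB1_counters]
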